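-- pv_equiv track=rewrite | github.com/StephensMane/TP5_Fournie_Manebard | TP5_qualite_Fournie_Manebard.py | Feature4x5
-- ===== SOURCE A (Python) =====
-- def Feature4x5(nom):
--
--   liste_noms = list()
--   i = 0
--
--   while i < len(nom):
--
--     liste_noms += [""]
--     while i < len(nom) and nom[i] != ',':
--
--       liste_noms[len(liste_noms)-1] += nom[i]
--       i += 1
--
--     i += 1
--
--   message = "Hello, "
--
--   for noms in liste_noms:
--
--     if not noms[0].isupper():
--       noms = noms[0:1].capitalize() + noms[1:]
--
--     message += noms +' '
--
--   return message
-- ===== SOURCE B (Python) =====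
-- def Feature4x5(nom):
--     # Single pass with find/slices instead of building an intermediate list of
--     # names char by char.
--     message = "Hello, "
--     s = nom
--     while s:
--         j = s.find(',')
--         if j == -1:
--             name, s = s, ""
--         else:
--             name, s = s[:j], s[j + 1:]
--         if not name[0].isupper():
--             name = name[0:1].capitalize() + name[1:]
--         message += name + ' '
--     return message
-- ===== Notes on version B (the rewrite author's own statement) =====
-- stated objective: alternative
-- what changed: B makes a single pass over the string using find and slicing, carrying the growing message directly, instead of A's two phases (char-by-char accumulation into a list of name strings, then a formatting loop over that list).
import Mathlib
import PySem

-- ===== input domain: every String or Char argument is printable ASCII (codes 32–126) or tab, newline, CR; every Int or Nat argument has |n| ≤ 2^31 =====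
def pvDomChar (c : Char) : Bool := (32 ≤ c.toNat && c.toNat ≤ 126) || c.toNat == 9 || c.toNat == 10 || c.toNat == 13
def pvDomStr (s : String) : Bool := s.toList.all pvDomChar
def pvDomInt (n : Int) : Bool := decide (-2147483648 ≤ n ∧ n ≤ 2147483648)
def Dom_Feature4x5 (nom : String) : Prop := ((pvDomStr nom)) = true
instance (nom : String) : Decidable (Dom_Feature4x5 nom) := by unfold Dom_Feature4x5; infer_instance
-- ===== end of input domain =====

-- B replaces A's two phases (char-by-char split into a name list, then a formatting
-- loop) by one pass with find/slices; equal on inputs with no empty name field.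

-- ===== PORT A =====
-- inner while loop: append chars of the current name until ',' or end of string;
-- returns (the accumulated name, the remaining characters after the comma, if any)
def aField : List Char → List Char → (List Char × List Char)
  | acc, [] => (acc, [])
  | acc, c :: rest => if c = ',' then (acc, rest) else aField (acc ++ [c]) rest

theorem aField_rest_lt (acc : List Char) (c : Char) (s : List Char) :
    (aField acc (c :: s)).2.length < (c :: s).length := by
  induction s generalizing acc c with
  | nil => simp [aField]; split <;> simp
  | cons d t ih =>
    simp only [aField]
    split
    · simp
    · exact Nat.lt_trans (ih _ d) (by simp)

-- outer while loop: 'liste_noms += [""]' then the inner loop fills the last entry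
def aSplit (s : List Char) (acc : List (List Char)) : List (List Char) :=
  match s with
  | [] => acc
  | c :: rest => aSplit (aField [] (c :: rest)).2 (acc ++ [(aField [] (c :: rest)).1])
termination_by s.length
decreasing_by exact aField_rest_lt [] c rest

-- 'if not noms[0].isupper(): noms = noms[0:1].capitalize() + noms[1:]'
-- (capitalize of the one-char slice = upperChar on ASCII; an empty name is an
-- IndexError in Python, excluded by Pre_, returned unchanged here)
def aCap (n : List Char) : List Char :=
  match n with
  | [] => n
  | c :: cs => if !(PySem.Chars.isupper c) then PySem.Chars.upperChar c :: cs else c :: cs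

-- the 'for noms in liste_noms' formatting loop over the accumulated message
def aMsg : List (List Char) → List Char → List Char
  | [], m => m
  | n :: rest, m => aMsg rest (m ++ aCap n ++ [' '])

def Feature4x5 (nom : String) : String :=
  String.mk (aMsg (aSplit nom.toList []) "Hello, ".toList)

-- ===== PORT B =====
def bCap (name : List Char) : List Char :=
  match name with
  | [] => name
  | c :: cs => if !(PySem.Chars.isupper c) then PySem.Chars.upperChar c :: cs else c :: cs

-- Source B's single while loop: s.find(','), slice out the name, slice off the rest
def bLoop (s : List Char) (msg : List Char) : List Char :=
  match s with
  | [] => msg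
  | c :: rest =>
    if PySem.Chars.find (c :: rest) [','] = -1 then
      bLoop [] (msg ++ bCap (c :: rest) ++ [' '])
    else
      bLoop ((c :: rest).drop ((PySem.Chars.find (c :: rest) [',']).toNat + 1))
        (msg ++ bCap ((c :: rest).take (PySem.Chars.find (c :: rest) [',']).toNat) ++ [' '])
termination_by s.length
decreasing_by
  · simp
  · simp

def Feature4x5_alt (nom : String) : String :=
  String.mk (bLoop nom.toList "Hello, ".toList)

-- ===== PRECONDITION & SPEC =====
-- Pre_ excludes exactly the inputs with an empty name field before a comma (a
-- leading comma or two adjacent commas): there A (and B) raise IndexError at noms[0].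
def Pre_Feature4x5 (nom : String) : Prop :=
  PySem.Str.startswith nom "," = false ∧ PySem.Str.isIn ",," nom = false
instance (nom : String) : Decidable (Pre_Feature4x5 nom) := by unfold Pre_Feature4x5; infer_instance
def pvWitness_Feature4x5 : String := "alice,bob,"

def Spec_Feature4x5 (nom : String) (out : String) : Prop := out = Feature4x5_alt nom
instance (nom : String) (out : String) : Decidable (Spec_Feature4x5 nom out) := by unfold Spec_Feature4x5; infer_instance

-- ===== CLAIM (what is proved, stated in full; the proofs are below) =====
def Claim_equal_Feature4x5 : Prop := ∀ (nom : String), Dom_Feature4x5 nom → Pre_Feature4x5 nom → Spec_Feature4x5 nom (Feature4x5 nom)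

-- ===== LEMMAS AND PROOFS =====

theorem bCap_eq_aCap (n : List Char) : bCap n = aCap n := rfl

theorem aField_no_comma (s acc : List Char) (h : ',' ∉ s) :
    aField acc s = (acc ++ s, []) := by
  induction s generalizing acc with
  | nil => simp [aField]
  | cons c rest ih =>
    simp only [List.mem_cons, not_or] at h
    simp only [aField]
    rw [if_neg (fun hc => h.1 hc.symm), ih _ h.2]
    simp

theorem aField_comma (k : Nat) (s acc : List Char)
    (hk : s[k]? = some ',') (hlt : ∀ i < k, s[i]? ≠ some ',') :
    aField acc s = (acc ++ s.take k, s.drop (k + 1)) := by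
  induction k generalizing s acc with
  | zero =>
    cases s with
    | nil => simp at hk
    | cons c rest =>
      simp at hk
      simp [aField, hk]
  | succ k ih =>
    cases s with
    | nil => simp at hk
    | cons c rest =>
      have hc : c ≠ ',' := by
        have := hlt 0 (Nat.succ_pos k); simpa using this
      simp only [aField, if_neg hc]
      rw [ih rest (acc ++ [c]) (by simpa using hk)
        (fun i hi => by have := hlt (i + 1) (by omega); simpa using this)]
      simp

theorem aSplit_acc (s : List Char) (acc : List (List Char)) :
    aSplit s acc = acc ++ aSplit s [] := by
  induction hn : s.length using Nat.strong_induction_on generalizing s acc with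
  | _ n ih =>
    cases s with
    | nil => simp [aSplit]
    | cons c rest =>
      have hlt := aField_rest_lt [] c rest
      rw [aSplit, aSplit,
        ih _ (hn ▸ hlt) (aField [] (c :: rest)).2 (acc ++ [(aField [] (c :: rest)).1]) rfl,
        ih _ (hn ▸ hlt) (aField [] (c :: rest)).2 ([] ++ [(aField [] (c :: rest)).1]) rfl]
      simp

theorem aMsg_cons (n : List Char) (l : List (List Char)) (m : List Char) :
    aMsg (n :: l) m = aMsg l (m ++ aCap n ++ [' ']) := rfl

-- the invariant: no name field is empty from here on
def GoodTail (s : List Char) : Prop :=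
  s.head? ≠ some ',' ∧ ¬ [',', ','] <:+: s

theorem main_lemma (s m : List Char) (hg : GoodTail s) :
    bLoop s m = aMsg (aSplit s []) m := by
  induction hn : s.length using Nat.strong_induction_on generalizing s m with
  | _ n ih =>
    cases s with
    | nil => simp [bLoop, aSplit, aMsg]
    | cons c rest =>
      have hc : c ≠ ',' := by
        intro h; exact hg.1 (by simp [h])
      by_cases hfind : PySem.Chars.find (c :: rest) [','] = -1
      · -- no comma: one final name
        have hnc : ',' ∉ (c :: rest) := by
          intro hmem
          obtain ⟨u, v, huv⟩ := List.append_of_mem hmem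
          exact (PySem.Chars.find_eq_neg_one_iff _ _).mp hfind ⟨u, v, by simp [huv]⟩
        have hf := aField_no_comma (c :: rest) [] hnc
        have hf1 : (aField [] (c :: rest)).1 = c :: rest := by simp [hf]
        have hf2 : (aField [] (c :: rest)).2 = [] := by simp [hf]
        rw [aSplit, hf1, hf2, List.nil_append, aSplit, aMsg_cons]
        simp only [bLoop, if_pos hfind]
        rw [← bCap_eq_aCap]
        simp [aMsg]
      · -- a comma at index k
        have hinf : [','] <:+: (c :: rest) := by
          by_contra hninf
          exact hfind ((PySem.Chars.find_eq_neg_one_iff _ _).mpr hninf)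
        have hpos : 0 ≤ PySem.Chars.find (c :: rest) [','] :=
          (PySem.Chars.find_nonneg_iff _ _).mpr hinf
        obtain ⟨hpre, hmin⟩ := PySem.Chars.find_spec hpos
        set k := (PySem.Chars.find (c :: rest) [',']).toNat with hkdef
        have hk : (c :: rest)[k]? = some ',' := by
          obtain ⟨t, ht⟩ := hpre
          have h0 : ((c :: rest).drop k)[0]? = some ',' := by rw [← ht]; rfl
          rw [List.getElem?_drop] at h0
          simpa using h0
        obtain ⟨hklen, hgk⟩ := List.getElem?_eq_some_iff.mp hk
        have h1 : (c :: rest).drop k = ',' :: (c :: rest).drop (k + 1) := by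
          rw [List.drop_eq_getElem_cons hklen, hgk]
        have hlt : ∀ i < k, (c :: rest)[i]? ≠ some ',' := by
          intro i hi hcomma
          obtain ⟨hilen, hgi⟩ := List.getElem?_eq_some_iff.mp hcomma
          exact hmin i hi ⟨(c :: rest).drop (i + 1), by
            rw [List.singleton_append, ← hgi, ← List.drop_eq_getElem_cons hilen]⟩
        have hfield := aField_comma k (c :: rest) [] hk hlt
        have hfield1 : (aField [] (c :: rest)).1 = (c :: rest).take k := by simp [hfield]
        have hfield2 : (aField [] (c :: rest)).2 = (c :: rest).drop (k + 1) := by simp [hfield]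
        have hgood' : GoodTail ((c :: rest).drop (k + 1)) := by
          constructor
          · intro hh
            cases hdrop : (c :: rest).drop (k + 1) with
            | nil => rw [hdrop] at hh; simp at hh
            | cons d t =>
              rw [hdrop] at hh
              simp at hh
              apply hg.2
              have h2 : [',', ','] <+: (c :: rest).drop k := by
                rw [h1, hdrop, hh]; exact ⟨t, rfl⟩
              exact h2.isInfix.trans ((c :: rest).drop_suffix k).isInfix
          · intro hh
            exact hg.2 (hh.trans ((c :: rest).drop_suffix (k + 1)).isInfix)
        have hlen' : ((c :: rest).drop (k + 1)).length < n := by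
          rw [← hn]; simp
        simp only [bLoop, if_neg hfind, ← hkdef]
        rw [ih _ hlen' _ _ hgood' rfl,
          aSplit, hfield1, hfield2, List.nil_append,
          aSplit_acc ((c :: rest).drop (k + 1)) [(c :: rest).take k],
          List.singleton_append, aMsg_cons, ← bCap_eq_aCap]

theorem good_of_pre (nom : String) (h : Pre_Feature4x5 nom) : GoodTail nom.toList := by
  obtain ⟨h1, h2⟩ := h
  refine ⟨?_, ?_⟩
  · intro hh
    cases hl : nom.toList with
    | nil => rw [hl] at hh; simp at hh
    | cons c t =>
      rw [hl] at hh
      simp at hh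
      have hsw : PySem.Chars.startswith nom.toList [','] = true := by
        rw [PySem.Chars.startswith_iff]
        exact ⟨t, by simp [hl, hh]⟩
      have he : (",".toList : List Char) = [','] := rfl
      have h1' : PySem.Chars.startswith nom.toList [','] = false := by
        rw [← he, ← PySem.Str.startswith_eq]; exact h1
      exact Bool.noConfusion (h1'.symm.trans hsw)
  · intro hh
    have hin : PySem.Chars.isIn [',', ','] nom.toList = true :=
      (PySem.Chars.isIn_iff_infix _ _).mpr hh
    have he : (",,".toList : List Char) = [',', ','] := rfl
    have h2' : PySem.Chars.isIn [',', ','] nom.toList = false := by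
      rw [← he, ← PySem.Str.isIn_eq]; exact h2
    exact Bool.noConfusion (h2'.symm.trans hin)

-- ===== VERDICT (by name: the statement is the Claim_ definition above) =====
theorem Feature4x5_spec : Claim_equal_Feature4x5 := by
  intro nom _ hpre
  unfold Spec_Feature4x5 Feature4x5 Feature4x5_alt
  rw [main_lemma _ _ (good_of_pre nom hpre)]
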